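-- pv_equiv track=rewrite | github.com/aww/adventofcode | 2025/day04_printing_department.py | accessible_rolls
-- ===== SOURCE A (Python) =====
-- def accessible_rolls(input: list[str]) -> int:
--     # A little overkill, but maybe useful in part 2,
--     # we start by creating a dictionary of roll coordinates -> neighbor count;
--     # then we just count entries with low neighbor counts.
--     rolls: dict[tuple[int, int], int] = dict()
--     for irow, row in enumerate(input):
--         for icol, char in enumerate(row):
--             if char == "@":
--                 thiscoord = (irow, icol)
--                 if thiscoord not in rolls:
--                     rolls[thiscoord] = 0
--                 for prevneighbor in [
--                     (irow - 1, icol - 1),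
--                     (irow - 1, icol),
--                     (irow - 1, icol + 1),
--                     (irow, icol - 1),
--                 ]:
--                     if prevneighbor in rolls:
--                         rolls[prevneighbor] += 1
--                         rolls[thiscoord] += 1
--     accessiblecount = 0
--     for neighborcount in rolls.values():
--         if neighborcount < 4:
--             accessiblecount += 1
--     return accessiblecount
-- ===== SOURCE B (Python) =====
-- def accessible_rolls(input: list[str]) -> int:
--     # Build the set of roll coordinates once, then count per cell how many of
--     # its 8 neighbours are rolls.
--     coords = set()
--     for irow, row in enumerate(input):
--         for icol, char in enumerate(row):
--             if char == "@":
--                 coords.add((irow, icol))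
--     accessible = 0
--     for (r, c) in coords:
--         neighbors = 0
--         for q in [(r - 1, c - 1), (r - 1, c), (r - 1, c + 1),
--                   (r, c - 1), (r, c + 1),
--                   (r + 1, c - 1), (r + 1, c), (r + 1, c + 1)]:
--             if q in coords:
--                 neighbors += 1
--         if neighbors < 4:
--             accessible += 1
--     return accessible
-- ===== Notes on version B (the rewrite author's own statement) =====
-- stated objective: simpler
-- what changed: A maintains a dict of per-cell neighbor counters updated per edge during the scan (bumping both endpoints via the 4 already-seen neighbors); B first builds the set of '@' coordinates and then, in a separate pass, counts for each roll how many of its 8 neighbor coordinates are in the set.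
import Mathlib
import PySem

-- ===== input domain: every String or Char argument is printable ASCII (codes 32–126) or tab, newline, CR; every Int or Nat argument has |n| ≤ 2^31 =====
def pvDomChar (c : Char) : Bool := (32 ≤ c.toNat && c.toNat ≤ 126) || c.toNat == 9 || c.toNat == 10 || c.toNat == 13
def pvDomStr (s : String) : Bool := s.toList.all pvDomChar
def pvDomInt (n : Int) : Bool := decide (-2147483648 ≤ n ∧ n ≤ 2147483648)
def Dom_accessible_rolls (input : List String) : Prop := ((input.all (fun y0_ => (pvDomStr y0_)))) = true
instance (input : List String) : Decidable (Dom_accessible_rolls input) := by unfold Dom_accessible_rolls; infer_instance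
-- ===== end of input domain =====

-- B replaces A's interleaved per-edge neighbor bookkeeping (a dict updated with prior
-- neighbors during the scan) by a two-phase pass: build the set of roll coordinates,
-- then count per cell how many of its 8 neighbors are in the set (objective: simpler).

-- ===== PORT A =====
def accessible_rolls (input : List String) : Int :=
  let rolls : PySem.Dict (Int × Int) Int :=
    (PySem.List.enumerate input).foldl (fun rolls p =>
      (PySem.List.enumerate p.2.toList).foldl (fun rolls q =>
        if q.2 = '@' then
          let thiscoord := (p.1, q.1)
          let rolls := if rolls.contains thiscoord then rolls else rolls.insert thiscoord 0
          [(p.1 - 1, q.1 - 1), (p.1 - 1, q.1), (p.1 - 1, q.1 + 1), (p.1, q.1 - 1)].foldl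
            (fun rolls prevneighbor =>
              if rolls.contains prevneighbor then
                (rolls.modify prevneighbor 0 (· + 1)).modify thiscoord 0 (· + 1)
              else rolls) rolls
        else rolls) rolls) PySem.Dict.empty
  rolls.values.foldl (fun acc v => if v < 4 then acc + 1 else acc) 0

-- ===== PORT B =====
def accessible_rolls_alt (input : List String) : Int :=
  let coords : PySem.Set (Int × Int) :=
    (PySem.List.enumerate input).foldl (fun s p =>
      (PySem.List.enumerate p.2.toList).foldl (fun s q =>
        if q.2 = '@' then PySem.Set.add s (p.1, q.1) else s) s) PySem.Set.empty
  coords.foldl (fun acc rc =>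
    let neighbors :=
      [(rc.1 - 1, rc.2 - 1), (rc.1 - 1, rc.2), (rc.1 - 1, rc.2 + 1),
       (rc.1, rc.2 - 1), (rc.1, rc.2 + 1),
       (rc.1 + 1, rc.2 - 1), (rc.1 + 1, rc.2), (rc.1 + 1, rc.2 + 1)].foldl
        (fun n q => if PySem.Set.contains coords q then n + 1 else n) (0 : Int)
    if neighbors < 4 then acc + 1 else acc) 0

-- ===== PRECONDITION & SPEC =====
def Spec_accessible_rolls (input : List String) (out : Int) : Prop := out = accessible_rolls_alt input
instance (input : List String) (out : Int) : Decidable (Spec_accessible_rolls input out) := by unfold Spec_accessible_rolls; infer_instance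

-- ===== CLAIM (what is proved, stated in full; the proofs are below) =====
def Claim_equal_accessible_rolls : Prop := ∀ (input : List String), Dom_accessible_rolls input → Spec_accessible_rolls input (accessible_rolls input)

-- ===== LEMMAS AND PROOFS =====

/-- Lexicographic order on coordinates = the scan order of the double loop. -/
def pvLexLt (p q : Int × Int) : Prop := p.1 < q.1 ∨ (p.1 = q.1 ∧ p.2 < q.2)

/-- The four neighbors A inspects (those that precede `p` in scan order). -/
def pvPrevs (p : Int × Int) : List (Int × Int) :=
  [(p.1 - 1, p.2 - 1), (p.1 - 1, p.2), (p.1 - 1, p.2 + 1), (p.1, p.2 - 1)]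

/-- All eight neighbors, as B lists them. -/
def pvNbrs (p : Int × Int) : List (Int × Int) :=
  [(p.1 - 1, p.2 - 1), (p.1 - 1, p.2), (p.1 - 1, p.2 + 1),
   (p.1, p.2 - 1), (p.1, p.2 + 1),
   (p.1 + 1, p.2 - 1), (p.1 + 1, p.2), (p.1 + 1, p.2 + 1)]

/-- Coordinates of the `'@'` cells of one row. -/
def pvRowCoords (ir : Int) (cs : List Char) : List (Int × Int) :=
  (PySem.List.enumerate cs).filterMap (fun q => if q.2 = '@' then some (ir, q.1) else none)

/-- All roll coordinates in scan order. -/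
def pvCoords (input : List String) : List (Int × Int) :=
  (PySem.List.enumerate input).flatMap (fun p => pvRowCoords p.1 p.2.toList)

/-- The body A executes for each roll coordinate. -/
def pvStepA (d : PySem.Dict (Int × Int) Int) (x : Int × Int) : PySem.Dict (Int × Int) Int :=
  let d := if d.contains x then d else d.insert x 0
  (pvPrevs x).foldl
    (fun d q => if d.contains q then (d.modify q 0 (· + 1)).modify x 0 (· + 1) else d) d

/-- Number of elements of `L` adjacent to `p`. -/
def pvDeg (L : List (Int × Int)) (p : Int × Int) : Int :=
  (L.countP (fun q => decide (q ∈ pvNbrs p)) : Int)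

theorem pvNbrs_symm (p q : Int × Int) : q ∈ pvNbrs p ↔ p ∈ pvNbrs q := by
  obtain ⟨a, b⟩ := p; obtain ⟨c, d⟩ := q
  simp [pvNbrs, Prod.ext_iff]; omega

theorem pvMem_prevs_iff (p q : Int × Int) :
    q ∈ pvPrevs p ↔ q ∈ pvNbrs p ∧ pvLexLt q p := by
  obtain ⟨a, b⟩ := p; obtain ⟨c, d⟩ := q
  simp [pvPrevs, pvNbrs, pvLexLt, Prod.ext_iff]; omega

theorem pvNodup_prevs (p : Int × Int) : (pvPrevs p).Nodup := by
  obtain ⟨a, b⟩ := p; simp [pvPrevs, Prod.ext_iff]; omega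

theorem pvNodup_nbrs (p : Int × Int) : (pvNbrs p).Nodup := by
  obtain ⟨a, b⟩ := p; simp [pvNbrs, Prod.ext_iff]; omega

theorem pvSelf_not_mem_prevs (p : Int × Int) : p ∉ pvPrevs p := by
  obtain ⟨a, b⟩ := p; simp [pvPrevs, Prod.ext_iff]; omega

/-- Swap the roles of the two lists in counting a (nodup) intersection. -/
theorem pvCountP_swap {α : Type} [BEq α] [LawfulBEq α] (A B : List α)
    (hA : A.Nodup) (hB : B.Nodup) :
    A.countP (fun a => decide (a ∈ B)) = B.countP (fun b => decide (b ∈ A)) := by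
  rw [List.countP_eq_length_filter, List.countP_eq_length_filter]
  exact List.Perm.length_eq <| (List.perm_ext_iff_of_nodup
    (hA.filter _) (hB.filter _)).2 (fun a => by simp [List.mem_filter, and_comm])

/-- A counting fold pulled out as countP. -/
theorem pvFoldl_count {α : Type} (P : α → Prop) [DecidablePred P] (l : List α) (acc : Int) :
    l.foldl (fun a v => if P v then a + 1 else a) acc
      = acc + (l.countP (fun v => decide (P v)) : Int) := by
  induction l generalizing acc with
  | nil => simp
  | cons x xs ih =>
    simp only [List.foldl_cons, List.countP_cons, ih]
    by_cases h : P x <;> simp [h] <;> ring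

/-- Inner four-neighbor fold of A: effect on keys and values. -/
theorem pvInnerFold (x : Int × Int) (qs : List (Int × Int)) (d : PySem.Dict (Int × Int) Int)
    (hx : x ∉ qs) (hnd : qs.Nodup) (hcx : d.contains x = true) :
    let e := qs.foldl
      (fun d q => if d.contains q then (d.modify q 0 (· + 1)).modify x 0 (· + 1) else d) d
    e.keys = d.keys ∧
    e.getD x 0 = d.getD x 0 + (qs.countP (fun q => d.contains q) : Int) ∧
    ∀ p, p ≠ x → e.getD p 0 = d.getD p 0 + (if p ∈ qs ∧ d.contains p then 1 else 0) := by
  induction qs generalizing d with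
  | nil => simp
  | cons q qs ih =>
    simp only [List.mem_cons, not_or] at hx
    obtain ⟨hxq, hxqs⟩ := hx
    obtain ⟨hqqs, hndqs⟩ := List.nodup_cons.1 hnd
    by_cases hc : d.contains q
    · -- q already present: both counters bump
      have hkeysq : (d.modify q 0 (· + 1)).keys = d.keys := by
        rw [PySem.Dict.keys_modify, PySem.Dict.keys_insert_of_contains _ _ hc]
      have hcxq : (d.modify q 0 (· + 1)).contains x = true := by
        rw [PySem.Dict.contains_modify]; simp [hcx]
      set d' := (d.modify q 0 (· + 1)).modify x 0 (· + 1) with hd'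
      have hkeys' : d'.keys = d.keys := by
        rw [hd', PySem.Dict.keys_modify, PySem.Dict.keys_insert_of_contains _ _ hcxq, hkeysq]
      have hcont' : ∀ r, d'.contains r = d.contains r := by
        intro r
        rw [PySem.Dict.contains_eq_decide_mem_keys, hkeys',
          ← PySem.Dict.contains_eq_decide_mem_keys]
      have hgetx' : d'.getD x 0 = d.getD x 0 + 1 := by
        rw [hd', PySem.Dict.getD_modify, if_pos rfl, PySem.Dict.getD_modify,
          if_neg hxq]
      have hgetp' : ∀ p, p ≠ x → d'.getD p 0 = if p = q then d.getD q 0 + 1 else d.getD p 0 := by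
        intro p hpx
        rw [hd', PySem.Dict.getD_modify, if_neg hpx, PySem.Dict.getD_modify]
      have hcx' : d'.contains x = true := by rw [hcont']; exact hcx
      obtain ⟨ihk, ihx, ihp⟩ := ih d' hxqs hndqs hcx'
      refine ⟨?_, ?_, ?_⟩
      · simp only [List.foldl_cons, if_pos hc, ← hd']; rw [ihk, hkeys']
      · simp only [List.foldl_cons, if_pos hc, ← hd']
        rw [ihx, hgetx', List.countP_cons, if_pos hc,
          List.countP_congr (fun r _ => by rw [hcont' r])]
        push_cast; ring
      · intro p hpx
        simp only [List.foldl_cons, if_pos hc, ← hd']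
        rw [ihp p hpx, hgetp' p hpx]
        by_cases hpq : p = q
        · subst hpq
          have : ¬(p ∈ qs ∧ d'.contains p = true) := fun h => hqqs h.1
          simp [this, hc]
        · rw [if_neg hpq]
          congr 1
          simp only [hcont', List.mem_cons]
          by_cases hm : p ∈ qs <;> simp [hm, hpq]
    · -- q not yet present: no change
      obtain ⟨ihk, ihx, ihp⟩ := ih d hxqs hndqs hcx
      refine ⟨?_, ?_, ?_⟩
      · simpa [List.foldl_cons, hc] using ihk
      · simp only [List.foldl_cons, if_neg hc]
        rw [ihx, List.countP_cons, if_neg (by simp [hc])]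
        simp
      · intro p hpx
        simp only [List.foldl_cons, if_neg hc]
        rw [ihp p hpx]
        congr 1
        by_cases hpq : p = q
        · subst hpq; simp [hc]
        · simp [hpq]

theorem pvLexLt_irrefl (p : Int × Int) : ¬ pvLexLt p p := by
  simp [pvLexLt]

/-- Characterization of A's dict after processing a scan-ordered coordinate list. -/
theorem pvFoldA (L : List (Int × Int)) (hL : L.Pairwise pvLexLt) :
    (L.foldl pvStepA PySem.Dict.empty).keys = L ∧
    ∀ p ∈ L, (L.foldl pvStepA PySem.Dict.empty).getD p 0 = pvDeg L p := by
  induction L using List.reverseRecOn with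
  | nil => simp
  | append_singleton L' x ih =>
    rw [List.pairwise_append] at hL
    obtain ⟨hL', -, hcross⟩ := hL
    have hcross' : ∀ p ∈ L', pvLexLt p x := fun p hp => hcross p hp x (by simp)
    obtain ⟨ihk, ihv⟩ := ih hL'
    have hxL' : x ∉ L' := fun h => pvLexLt_irrefl x (hcross' x h)
    set d := L'.foldl pvStepA PySem.Dict.empty with hd
    have hcd : ∀ r, d.contains r = decide (r ∈ L') := by
      intro r; rw [PySem.Dict.contains_eq_decide_mem_keys, ihk]
    have hcdx : d.contains x = false := by rw [hcd]; simp [hxL']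
    -- the step at x
    have hstep : pvStepA d x = (pvPrevs x).foldl
        (fun d q => if d.contains q then (d.modify q 0 (· + 1)).modify x 0 (· + 1) else d)
        (d.insert x 0) := by
      simp [pvStepA, hcdx]
    set d1 := d.insert x 0 with hd1
    have hk1 : d1.keys = L' ++ [x] := by
      rw [hd1, PySem.Dict.keys_insert_of_not_contains _ _ hcdx, ihk]
    have hc1 : ∀ r, d1.contains r = decide (r ∈ L' ++ [x]) := by
      intro r; rw [PySem.Dict.contains_eq_decide_mem_keys, hk1]
    have hc1x : d1.contains x = true := by rw [hc1]; simp
    have hg1x : d1.getD x 0 = 0 := by rw [hd1, PySem.Dict.getD_insert]; simp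
    have hg1p : ∀ p, p ≠ x → d1.getD p 0 = d.getD p 0 := by
      intro p hpx; rw [hd1, PySem.Dict.getD_insert, if_neg hpx]
    have hxprevs : x ∉ pvPrevs x := pvSelf_not_mem_prevs x
    obtain ⟨ek, ex, ep⟩ := pvInnerFold x (pvPrevs x) d1 hxprevs (pvNodup_prevs x) hc1x
    constructor
    · rw [List.foldl_append, List.foldl_cons, List.foldl_nil, hstep, ek, hk1]
    · intro p hp
      rw [List.foldl_append, List.foldl_cons, List.foldl_nil, hstep]
      rcases List.mem_append.1 hp with hpL' | hpx
      · -- an old coordinate: gains 1 iff x is adjacent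
        have hpx : p ≠ x := fun h => hxL' (h ▸ hpL')
        rw [ep p hpx, hg1p p hpx, ihv p hpL']
        have hmem : (p ∈ pvPrevs x ∧ d1.contains p = true) ↔ x ∈ pvNbrs p := by
          rw [hc1]
          constructor
          · rintro ⟨hpp, -⟩
            exact (pvNbrs_symm x p).1 ((pvMem_prevs_iff x p).1 hpp).1
          · intro hxn
            refine ⟨(pvMem_prevs_iff x p).2 ⟨(pvNbrs_symm x p).2 hxn, hcross' p hpL'⟩, by simp [hpL']⟩
        have hdapp : pvDeg (L' ++ [x]) p = pvDeg L' p + (if x ∈ pvNbrs p then 1 else 0) := by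
          simp only [pvDeg, List.countP_append, List.countP_cons, List.countP_nil]
          by_cases h : x ∈ pvNbrs p <;> simp [h]
        rw [hdapp]
        by_cases hxn : x ∈ pvNbrs p
        · rw [if_pos (hmem.2 hxn), if_pos hxn]
        · rw [if_neg (fun h => hxn (hmem.1 h)), if_neg hxn]
      · -- the new coordinate x itself
        simp only [List.mem_singleton] at hpx; subst hpx
        rw [ex, hg1x, zero_add]
        have h1 : (pvPrevs p).countP (fun q => d1.contains q)
            = (pvPrevs p).countP (fun q => decide (q ∈ L')) := by
          refine List.countP_congr (fun q hq => ?_)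
          rw [hc1]
          have hqp : q ≠ p := fun h => pvSelf_not_mem_prevs p (h ▸ hq)
          simp [hqp]
        have hL'nd : L'.Nodup := hL'.imp (fun h => fun he => pvLexLt_irrefl _ (he ▸ h))
        have h2 : (pvPrevs p).countP (fun q => decide (q ∈ L'))
            = L'.countP (fun q => decide (q ∈ pvPrevs p)) :=
          pvCountP_swap (pvPrevs p) L' (pvNodup_prevs p) hL'nd
        have h3 : L'.countP (fun q => decide (q ∈ pvPrevs p))
            = L'.countP (fun q => decide (q ∈ pvNbrs p)) := by
          refine List.countP_congr (fun q hq => ?_)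
          simp only [decide_eq_true_eq]
          rw [pvMem_prevs_iff]
          exact ⟨fun h => h.1, fun h => ⟨h, hcross' q hq⟩⟩
        rw [h1, h2, h3]
        have hnotself : p ∉ pvNbrs p := by
          obtain ⟨a, b⟩ := p; simp [pvNbrs, Prod.ext_iff]; omega
        simp [pvDeg, List.countP_append, hnotself]

/-- Pointwise-equal fold bodies give equal folds. -/
theorem pvFoldl_congr {α σ : Type} {f g : σ → α → σ} (l : List α) (s : σ)
    (h : ∀ a x, x ∈ l → f a x = g a x) : l.foldl f s = l.foldl g s := by
  induction l generalizing s with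
  | nil => rfl
  | cons x xs ih =>
    rw [List.foldl_cons, List.foldl_cons, h s x (by simp)]
    exact ih _ (fun a y hy => h a y (by simp [hy]))

/-- A conditional fold over an enumerated row is the fold over its roll coordinates. -/
theorem pvRowFold {σ : Type} (f : σ → Int × Int → σ) (ir : Int) (cs : List Char) (s : σ) :
    (PySem.List.enumerate cs).foldl
      (fun s q => if q.2 = '@' then f s (ir, q.1) else s) s
    = (pvRowCoords ir cs).foldl f s := by
  rw [pvRowCoords, List.foldl_filterMap]
  refine pvFoldl_congr _ _ (fun a q _ => ?_)
  by_cases h : q.2 = '@' <;> simp [h]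

/-- The whole double loop is a fold over the flattened coordinate list. -/
theorem pvGridFold {σ : Type} (f : σ → Int × Int → σ) (input : List String) (s : σ) :
    (PySem.List.enumerate input).foldl (fun s p =>
      (PySem.List.enumerate p.2.toList).foldl
        (fun s q => if q.2 = '@' then f s (p.1, q.1) else s) s) s
    = (pvCoords input).foldl f s := by
  rw [pvCoords, List.foldl_flatMap]
  exact pvFoldl_congr _ _ (fun a p _ => pvRowFold f p.1 p.2.toList a)

theorem pvFst_mem_rowCoords {ir : Int} {cs : List Char} {p : Int × Int} :
    p ∈ pvRowCoords ir cs → p.1 = ir := by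
  intro h
  simp only [pvRowCoords, List.mem_filterMap] at h
  obtain ⟨q, -, hq⟩ := h
  by_cases h2 : q.2 = '@' <;> simp [h2] at hq
  simp [← hq]

theorem pvPairwise_rowCoords (ir : Int) (cs : List Char) :
    (pvRowCoords ir cs).Pairwise pvLexLt := by
  rw [pvRowCoords, List.pairwise_filterMap]
  refine (PySem.List.pairwise_lt_enumerate cs 0).imp ?_
  intro a b hab x hx y hy
  by_cases ha : a.2 = '@' <;> simp [ha] at hx
  by_cases hb : b.2 = '@' <;> simp [hb] at hy
  subst hx; subst hy
  exact Or.inr ⟨rfl, hab⟩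

theorem pvPairwise_coords (input : List String) : (pvCoords input).Pairwise pvLexLt := by
  rw [pvCoords, List.pairwise_flatMap]
  refine ⟨fun p _ => pvPairwise_rowCoords p.1 p.2.toList, ?_⟩
  refine (PySem.List.pairwise_lt_enumerate input 0).imp ?_
  intro a b hab x hx y hy
  have hx1 := pvFst_mem_rowCoords hx
  have hy1 := pvFst_mem_rowCoords hy
  exact Or.inl (by rw [hx1, hy1]; exact hab)

theorem pvNodup_coords (input : List String) : (pvCoords input).Nodup :=
  (pvPairwise_coords input).imp (fun h => fun he => pvLexLt_irrefl _ (he ▸ h))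

/-- Folding `Set.add` over a nodup list of fresh elements just appends it. -/
theorem pvFoldl_add {α : Type} [BEq α] [LawfulBEq α] (l : List α) (s : PySem.Set α)
    (hnd : l.Nodup) (hdisj : ∀ x ∈ l, x ∉ s) : l.foldl PySem.Set.add s = s ++ l := by
  induction l generalizing s with
  | nil => simp
  | cons x xs ih =>
    obtain ⟨hxxs, hndxs⟩ := List.nodup_cons.1 hnd
    have hxs : x ∉ s := hdisj x (by simp)
    have hadd : PySem.Set.add s x = s ++ [x] := by
      simp [PySem.Set.add, PySem.Set.contains, hxs]
    rw [List.foldl_cons, hadd, ih (s ++ [x]) hndxs (fun y hy => by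
      simp only [List.mem_append, List.mem_singleton, not_or]
      exact ⟨hdisj y (by simp [hy]), fun h => hxxs (h ▸ hy)⟩)]
    simp

-- ===== VERDICT (by name: the statement is the Claim_ definition above) =====
theorem accessible_rolls_spec : Claim_equal_accessible_rolls := by
  intro input _
  unfold Spec_accessible_rolls accessible_rolls accessible_rolls_alt
  show (List.foldl (fun acc v => if v < 4 then acc + 1 else acc) 0
      (List.foldl (fun rolls p =>
        List.foldl (fun rolls q => if q.2 = '@' then pvStepA rolls (p.1, q.1) else rolls)
          rolls (PySem.List.enumerate p.2.toList))
        PySem.Dict.empty (PySem.List.enumerate input)).values)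
    = List.foldl (fun acc rc =>
        if (List.foldl (fun n q =>
              if PySem.Set.contains
                  (List.foldl (fun s p =>
                    List.foldl (fun s q => if q.2 = '@' then PySem.Set.add s (p.1, q.1) else s)
                      s (PySem.List.enumerate p.2.toList))
                    PySem.Set.empty (PySem.List.enumerate input)) q = true
              then n + 1 else n) (0 : Int)
            [(rc.1 - 1, rc.2 - 1), (rc.1 - 1, rc.2), (rc.1 - 1, rc.2 + 1),
             (rc.1, rc.2 - 1), (rc.1, rc.2 + 1),
             (rc.1 + 1, rc.2 - 1), (rc.1 + 1, rc.2), (rc.1 + 1, rc.2 + 1)]) < 4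
        then acc + 1 else acc) 0
        (List.foldl (fun s p =>
          List.foldl (fun s q => if q.2 = '@' then PySem.Set.add s (p.1, q.1) else s)
            s (PySem.List.enumerate p.2.toList))
          PySem.Set.empty (PySem.List.enumerate input))
  have hpair := pvPairwise_coords input
  have hnd := pvNodup_coords input
  -- A's double loop is the flattened fold of pvStepA
  rw [pvGridFold pvStepA input PySem.Dict.empty]
  -- B's double loop builds exactly the coordinate list
  rw [pvGridFold PySem.Set.add input PySem.Set.empty]
  rw [show (pvCoords input).foldl PySem.Set.add PySem.Set.empty = pvCoords input from by
    simpa using pvFoldl_add (pvCoords input) PySem.Set.empty hnd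
      (fun x hx => by simp [PySem.Set.empty])]
  obtain ⟨hkeys, hvals⟩ := pvFoldA (pvCoords input) hpair
  set L := pvCoords input with hLdef
  set d := L.foldl pvStepA PySem.Dict.empty with hd
  have hndk : d.keys.Nodup := hkeys ▸ hnd
  rw [PySem.Dict.values_eq_map_keys d hndk 0, hkeys]
  rw [pvFoldl_count (fun v : Int => v < 4) (List.map (fun k => d.getD k 0) L) 0,
    List.countP_map]
  rw [pvFoldl_count (fun rc : Int × Int =>
    ([(rc.1 - 1, rc.2 - 1), (rc.1 - 1, rc.2), (rc.1 - 1, rc.2 + 1),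
      (rc.1, rc.2 - 1), (rc.1, rc.2 + 1),
      (rc.1 + 1, rc.2 - 1), (rc.1 + 1, rc.2), (rc.1 + 1, rc.2 + 1)].foldl
        (fun n q => if PySem.Set.contains L q = true then n + 1 else n) (0 : Int)) < 4) L 0]
  simp only [zero_add, Int.natCast_inj]
  refine List.countP_congr (fun p hp => ?_)
  have hinner : [(p.1 - 1, p.2 - 1), (p.1 - 1, p.2), (p.1 - 1, p.2 + 1),
      (p.1, p.2 - 1), (p.1, p.2 + 1),
      (p.1 + 1, p.2 - 1), (p.1 + 1, p.2), (p.1 + 1, p.2 + 1)].foldl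
        (fun n q => if PySem.Set.contains L q = true then n + 1 else n) (0 : Int)
      = pvDeg L p := by
    show (pvNbrs p).foldl (fun n q => if PySem.Set.contains L q = true then n + 1 else n) (0 : Int)
      = pvDeg L p
    rw [pvFoldl_count (fun q => PySem.Set.contains L q = true) (pvNbrs p) 0, zero_add]
    rw [List.countP_congr (fun q _ => by
      simp [PySem.Set.contains] : ∀ q ∈ pvNbrs p,
        (decide (PySem.Set.contains L q = true)) = true ↔ (decide (q ∈ L)) = true)]
    rw [pvDeg, pvCountP_swap (pvNbrs p) L (pvNodup_nbrs p) hnd]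
  simp only [Function.comp, decide_eq_true_eq]
  rw [hvals p hp, hinner]
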